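-- pv_equiv track=rewrite | github.com/AnonymousEMNLP20/multidomain.lmtc | lmtc/neural_networks/layers/custom_bert/vocab.py | bpes2tokens
-- ===== SOURCE A (Python) =====
-- def bpes2tokens(subword_units, tokens):
--     length = 0
--     subword_list = []
--     bpes_starts = []
--     counter = 0
--     for i, subword_unit in enumerate(subword_units):
--         length += 1
--         subword_list.append(subword_unit)
--         if tokens[counter].lower() == ''.join(subword_list).replace('##', ''):
--             bpes_starts.extend([1] + [0] * (length-1))
--             length = 0
--             counter += 1
--             subword_list = []
--     if length != 0:
--         bpes_starts.extend([1] + [0] * (length-1))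
--
--     return bpes_starts
-- ===== SOURCE B (Python) =====
-- def bpes2tokens(subword_units, tokens):
--     n = len(subword_units)
--     mask = [0] * n
--     if n:
--         mask[0] = 1
--     j = 0
--     for tok in tokens:
--         target = tok.lower()
--         s = ''
--         p = None
--         for q in range(j, n):
--             s += subword_units[q]
--             if s.replace('##', '') == target:
--                 p = q + 1
--                 break
--         if p is None or p == n:
--             return mask
--         mask[p] = 1
--         j = p
--     return mask
-- ===== Notes on version B (the rewrite author's own statement) =====
-- stated objective: alternative
-- what changed: A makes one flat pass over the subword units, accumulating a buffer list and appending a [1]+[0]*(k-1) block per closed group; B is token-driven: it preallocates a zero mask of length len(subword_units), and for each token searches for the least group end whose concatenated string (with '##' removed) spells the token, writing a 1 into the mask at each group start.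
import Mathlib
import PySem

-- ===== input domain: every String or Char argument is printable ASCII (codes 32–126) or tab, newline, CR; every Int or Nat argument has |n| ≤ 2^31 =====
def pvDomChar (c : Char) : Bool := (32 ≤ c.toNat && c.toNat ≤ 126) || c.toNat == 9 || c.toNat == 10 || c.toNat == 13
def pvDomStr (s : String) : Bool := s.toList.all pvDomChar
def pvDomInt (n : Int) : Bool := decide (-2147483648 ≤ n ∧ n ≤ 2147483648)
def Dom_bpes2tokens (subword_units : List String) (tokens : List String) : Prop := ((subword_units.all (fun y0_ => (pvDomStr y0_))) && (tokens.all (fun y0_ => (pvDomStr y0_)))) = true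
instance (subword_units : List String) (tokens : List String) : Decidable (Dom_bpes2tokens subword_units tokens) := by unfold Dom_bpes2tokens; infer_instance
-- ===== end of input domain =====

-- B rebuilds the mask by a token-driven search: for each token it finds the least
-- matching group end and writes a 1 into a preallocated zero mask at each group
-- start, instead of A's single subword scan that appends [1]+[0]*(k-1) blocks;
-- objective: alternative structure, same cost.

-- ''.join(l).replace('##', '')  (the comparison string both Pythons compute)
def pvJoinRep (l : List String) : String :=
  PySem.Str.replace (PySem.Str.join "" l) "##" ""

-- ===== PORT A =====
-- the for-loop of A as structural recursion over the remaining subword units;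
-- state = (length, subword_list, counter, bpes_starts); tokens[counter] via pyGet?
-- (where Python raises IndexError the port returns the list built so far — outside Pre_)
def pvALoop (tokens : List String) : List String → Nat → List String → Nat → List Int → List Int
  | [], length, _, _, bpes_starts =>
      if length ≠ 0 then bpes_starts ++ ((1 : Int) :: List.replicate (length - 1) 0) else bpes_starts
  | su :: rest, length, subword_list, counter, bpes_starts =>
      let length' := length + 1
      let sl' := subword_list ++ [su]
      match PySem.List.pyGet? tokens (counter : Int) with
      | none => bpes_starts
      | some t =>
        if PySem.Str.lower t = pvJoinRep sl' then
          pvALoop tokens rest 0 [] (counter + 1)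
            (bpes_starts ++ ((1 : Int) :: List.replicate (length' - 1) 0))
        else
          pvALoop tokens rest length' sl' counter bpes_starts

def bpes2tokens (subword_units : List String) (tokens : List String) : List Int :=
  pvALoop tokens subword_units 0 [] 0 []

-- ===== PORT B =====
-- inner for-loop of Source B: q runs from j to n-1 growing the accumulated string s
-- (carried as its list of code points — exact for Python str concatenation);
-- returns the first end position p = q+1 with s.replace('##','') == target, else none
def pvBFind (su : List String) (n : Nat) (target : List Char) (q : Nat) (s : List Char) : Option Nat :=
  if _h : q < n then
    if PySem.Chars.replace (s ++ (su.getD q "").toList) ['#', '#'] [] = target then some (q + 1)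
    else pvBFind su n target (q + 1) (s ++ (su.getD q "").toList)
  else none
  termination_by n - q

-- outer for-loop of Source B over tokens; state = (current group start j, mask);
-- mask[p] = 1 via pySetD (index p is in range by the p = n test, as in Python)
def pvBOuterM (su : List String) (n : Nat) : List String → Nat → List Int → List Int
  | [], _, mask => mask
  | tok :: ts, j, mask =>
      match pvBFind su n (PySem.Chars.lower tok.toList) j [] with
      | none => mask
      | some p =>
          if p = n then mask
          else pvBOuterM su n ts p (PySem.List.pySetD mask (p : Int) 1)

def bpes2tokens_alt (subword_units : List String) (tokens : List String) : List Int :=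
  let n := subword_units.length
  let mask := List.replicate n (0 : Int)
  let mask := if n ≠ 0 then PySem.List.pySetD mask 0 1 else mask
  pvBOuterM subword_units n tokens 0 mask

-- ===== PRECONDITION & SPEC =====
-- first end position p in (j, n] whose group su[j:p] spells t (A's greedy boundary)
def pvNext (su : List String) (j : Nat) (t : String) : Option Nat :=
  (List.range' (j + 1) (su.length - j)).find?
    (fun p => pvJoinRep ((su.drop j).take (p - j)) == PySem.Str.lower t)

-- greedy-boundary recursion over the tokens: true iff all tokens are matched while
-- subword units remain — exactly when Python A raises IndexError at tokens[counter]
def pvRaisesAux (su : List String) : List String → Nat → Bool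
  | [], j => decide (j < su.length)
  | t :: ts, j =>
      match pvNext su j t with
      | none => false
      | some p => pvRaisesAux su ts p

-- Pre_ holds exactly on the inputs where Python A returns normally; it excludes only
-- the inputs on which A raises IndexError (all tokens consumed, subword units left over)
def Pre_bpes2tokens (subword_units : List String) (tokens : List String) : Prop :=
  pvRaisesAux subword_units tokens 0 = false

instance (subword_units : List String) (tokens : List String) :
    Decidable (Pre_bpes2tokens subword_units tokens) := by
  unfold Pre_bpes2tokens; infer_instance

def pvWitness_bpes2tokens : List String × List String := (["he", "##llo"], ["Hello"])

def Spec_bpes2tokens (subword_units : List String) (tokens : List String) (out : List Int) : Prop := out = bpes2tokens_alt subword_units tokens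
instance (subword_units : List String) (tokens : List String) (out : List Int) : Decidable (Spec_bpes2tokens subword_units tokens out) := by unfold Spec_bpes2tokens; infer_instance

-- ===== CLAIM (what is proved, stated in full; the proofs are below) =====
def Claim_equal_bpes2tokens : Prop := ∀ (subword_units : List String) (tokens : List String), Dom_bpes2tokens subword_units tokens → Pre_bpes2tokens subword_units tokens → Spec_bpes2tokens subword_units tokens (bpes2tokens subword_units tokens)

-- ===== LEMMAS AND PROOFS =====

-- ghost: A's groups, emitted one inner scan per group (two-pointer view of A's loop)
def pvBInner (target : String) : List String → List String → Nat × List String × Bool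
  | buf, [] => (buf.length, [], false)
  | buf, su :: rest =>
      let buf' := buf ++ [su]
      if pvJoinRep buf' = target then (buf'.length, rest, true)
      else pvBInner target buf' rest

theorem pvBInner_rest_le (target : String) :
    ∀ (rest buf : List String), (pvBInner target buf rest).2.1.length ≤ rest.length := by
  intro rest
  induction rest with
  | nil => intro buf; simp [pvBInner]
  | cons su rest ih =>
      intro buf
      simp only [pvBInner]
      split
      · simp
      · exact le_trans (ih _) (Nat.le_succ _)

theorem pvBInner_cons_lt (target : String) (buf : List String) (su' : String) (rest : List String) :
    (pvBInner target buf (su' :: rest)).2.1.length < (su' :: rest).length := by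
  simp only [pvBInner]
  split
  · simp
  · exact Nat.lt_succ_of_le (pvBInner_rest_le target rest _)

-- ghost: token-at-a-time grouping (one step of pvTP per closed group)
def pvTP (tokens : List String) (counter : Nat) (rest : List String) : List Int :=
  match rest with
  | [] => []
  | su :: rest' =>
      match PySem.List.pyGet? tokens (counter : Int) with
      | none => []
      | some t =>
        let r := pvBInner (PySem.Str.lower t) [] (su :: rest')
        ((1 : Int) :: List.replicate (r.1 - 1) 0) ++
          pvTP tokens (if r.2.2 then counter + 1 else counter) r.2.1
  termination_by rest.length
  decreasing_by exact pvBInner_cons_lt _ _ _ _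

-- ghost: pvTP generalized to a pending (already-consumed) buffer sl,
-- aligning it with A's mid-group states
def pvG (tokens : List String) (counter : Nat) (sl : List String) (rest : List String) : List Int :=
  match rest with
  | [] => if sl.length ≠ 0 then (1 : Int) :: List.replicate (sl.length - 1) 0 else []
  | su :: rest' =>
      match PySem.List.pyGet? tokens (counter : Int) with
      | none => []
      | some t =>
        let r := pvBInner (PySem.Str.lower t) sl (su :: rest')
        ((1 : Int) :: List.replicate (r.1 - 1) 0) ++
          (if r.2.2 then pvG tokens (counter + 1) [] r.2.1 else [])
  termination_by rest.length
  decreasing_by exact pvBInner_cons_lt _ _ _ _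

theorem pvBInner_unmatched_nil (target : String) :
    ∀ (rest buf : List String), (pvBInner target buf rest).2.2 = false →
      (pvBInner target buf rest).2.1 = [] := by
  intro rest
  induction rest with
  | nil => intro buf _; simp [pvBInner]
  | cons su rest ih =>
      intro buf h
      simp only [pvBInner] at h ⊢
      split at h
      · simp_all
      · rename_i hne
        simp only [if_neg hne]
        exact ih _ h

theorem pvG_eq_pvTP (tokens : List String) :
    ∀ (n : Nat) (rest : List String), rest.length ≤ n → ∀ (counter : Nat),
      pvG tokens counter [] rest = pvTP tokens counter rest := by
  intro n
  induction n with
  | zero =>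
      intro rest h counter
      have : rest = [] := List.eq_nil_of_length_eq_zero (Nat.le_zero.mp h)
      subst this; simp [pvG, pvTP]
  | succ n ih =>
      intro rest h counter
      match rest with
      | [] => simp [pvG, pvTP]
      | su :: rest' =>
          rw [pvG, pvTP]
          cases hg : PySem.List.pyGet? tokens (counter : Int) with
          | none => rfl
          | some t =>
            have hlt := pvBInner_cons_lt (PySem.Str.lower t) [] su rest'
            have hlen : (pvBInner (PySem.Str.lower t) [] (su :: rest')).2.1.length ≤ n := by
              simp only [List.length_cons] at hlt h; omega
            cases hm : (pvBInner (PySem.Str.lower t) [] (su :: rest')).2.2 with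
            | true =>
                simp only [hm, if_pos]
                rw [ih _ hlen]
            | false =>
                have hnil := pvBInner_unmatched_nil (PySem.Str.lower t) (su :: rest') [] hm
                simp only [hm, if_false, Bool.false_eq_true, hnil]
                rw [pvTP]

theorem pvALoop_eq_pvG (tokens : List String) :
    ∀ (rest sl : List String) (counter : Nat) (acc : List Int),
      pvALoop tokens rest sl.length sl counter acc = acc ++ pvG tokens counter sl rest := by
  intro rest
  induction rest with
  | nil =>
      intro sl counter acc
      rw [pvALoop, pvG]
      split <;> simp
  | cons su rest' ih =>
      intro sl counter acc
      rw [pvALoop, pvG]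
      cases hg : PySem.List.pyGet? tokens (counter : Int) with
      | none => simp
      | some t =>
        simp only []
        by_cases hm : PySem.Str.lower t = pvJoinRep (sl ++ [su])
        · rw [if_pos hm]
          have hb : pvBInner (PySem.Str.lower t) sl (su :: rest')
              = (sl.length + 1, rest', true) := by
            simp [pvBInner, hm.symm]
          have := ih [] (counter + 1)
              (acc ++ ((1 : Int) :: List.replicate (sl.length + 1 - 1) 0))
          simp only [List.length_nil] at this
          rw [this, hb]
          simp
        · rw [if_neg hm]
          have hstep : pvALoop tokens rest' (sl.length + 1) (sl ++ [su]) counter acc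
              = acc ++ pvG tokens counter (sl ++ [su]) rest' := by
            have := ih (sl ++ [su]) counter acc
            simpa using this
          rw [hstep]
          have hne : pvJoinRep (sl ++ [su]) ≠ PySem.Str.lower t := fun h => hm h.symm
          have hb : pvBInner (PySem.Str.lower t) sl (su :: rest')
              = pvBInner (PySem.Str.lower t) (sl ++ [su]) rest' := by
            simp [pvBInner, hne]
          rw [hb]
          congr 1
          cases rest' with
          | nil => simp [pvG, pvBInner]
          | cons v rest'' => rw [pvG, hg]

theorem pvA_eq_pvTP (subword_units tokens : List String) :
    bpes2tokens subword_units tokens = pvTP tokens 0 subword_units := by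
  unfold bpes2tokens
  have h0 := pvALoop_eq_pvG tokens subword_units [] 0 []
  simp only [List.length_nil, List.nil_append] at h0
  rw [h0, pvG_eq_pvTP tokens subword_units.length subword_units (le_refl _)]

-- ===== bridge lemmas: strings vs code points =====

theorem str_eq_iff_toList (s t : String) : s = t ↔ s.toList = t.toList := by
  constructor
  · intro h; rw [h]
  · intro h
    have := congrArg String.ofList h
    simpa using this

theorem interc_nil_sep (l : List (List Char)) : ([] : List Char).intercalate l = l.flatten := by
  induction l with
  | nil => simp [List.intercalate]
  | cons a l ih =>
      cases l with
      | nil => simp [List.intercalate]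
      | cons b m =>
          simp only [List.intercalate] at *
          simp [List.intersperse] at *
          simp_all

-- the concatenation of a buffer, on the code-point side
def pvCat (l : List String) : List Char := (l.map String.toList).flatten

theorem toList_pvJoinRep (l : List String) :
    (pvJoinRep l).toList = PySem.Chars.replace (pvCat l) ['#', '#'] [] := by
  simp [pvJoinRep, PySem.Str.toList_replace, PySem.Str.toList_join, PySem.Chars.join,
    interc_nil_sep, pvCat]

-- a group comparison, moved from strings to code points
theorem cond_bridge (buf : List String) (u : String) (target : String) :
    (pvJoinRep (buf ++ [u]) = target) ↔
      (PySem.Chars.replace (pvCat buf ++ u.toList) ['#', '#'] [] = target.toList) := by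
  rw [str_eq_iff_toList, toList_pvJoinRep]
  simp [pvCat]

-- ===== pvBFind facts =====

theorem pvBFind_bounds (su : List String) (n : Nat) (target : List Char) :
    ∀ k q s p, n - q = k → pvBFind su n target q s = some p → q < p ∧ p ≤ n := by
  intro k
  induction k with
  | zero =>
      intro q s p hk h
      rw [pvBFind, dif_neg (by omega)] at h
      exact absurd h (by simp)
  | succ k ih =>
      intro q s p hk h
      rw [pvBFind] at h
      by_cases hq : q < n
      · rw [dif_pos hq] at h
        split at h
        · simp at h; omega
        · have := ih (q + 1) _ p (by omega) h
          omega
      · rw [dif_neg hq] at h; exact absurd h (by simp)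

-- pvBFind computes the first matching end and pvBInner consumes exactly that group
theorem pvBInner_eq_of_pvBFind (su : List String) (target : String) :
    ∀ k q (buf : List String), q ≤ su.length → su.length - q = k →
      pvBInner target buf (su.drop q) =
        (match pvBFind su su.length target.toList q (pvCat buf) with
          | some p => (buf.length + (p - q), su.drop p, true)
          | none => (buf.length + (su.length - q), ([] : List String), false)) := by
  intro k
  induction k with
  | zero =>
      intro q buf hq hk
      have hqn : q = su.length := by omega
      rw [pvBFind, dif_neg (by omega)]
      subst hqn
      simp [pvBInner]
  | succ k ih =>
      intro q buf hq hk
      have hqn : q < su.length := by omega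
      have hdrop : su.drop q = su[q] :: su.drop (q + 1) := List.drop_eq_getElem_cons hqn
      have hget : su.getD q "" = su[q] := List.getD_eq_getElem su "" hqn
      rw [pvBFind, dif_pos hqn, hget, hdrop]
      by_cases hc : pvJoinRep (buf ++ [su[q]]) = target
      · have hc' := (cond_bridge buf su[q] target).mp hc
        rw [if_pos hc']
        simp only [pvBInner, if_pos hc]
        simp
      · have hc' : ¬ (PySem.Chars.replace (pvCat buf ++ su[q].toList) ['#', '#'] [] = target.toList) :=
          fun h => hc ((cond_bridge buf su[q] target).mpr h)
        rw [if_neg hc']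
        simp only [pvBInner, if_neg hc]
        have hcat : pvCat buf ++ su[q].toList = pvCat (buf ++ [su[q]]) := by simp [pvCat]
        rw [hcat]
        have := ih (q + 1) (buf ++ [su[q]]) (by omega) (by omega)
        rw [this]
        cases hf : pvBFind su su.length target.toList (q + 1) (pvCat (buf ++ [su[q]])) with
        | none => simp; omega
        | some p =>
            have hb := pvBFind_bounds su su.length target.toList k (q + 1) _ p (by omega) hf
            simp
            omega

-- pvNext (the Pre_ characterization) is the same first-match search
theorem pvNext_aux (su : List String) (t : String) (j : Nat) :
    ∀ k q, j ≤ q → su.length - q = k →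
      (List.range' (q + 1) (su.length - q)).find?
          (fun p => pvJoinRep ((su.drop j).take (p - j)) == PySem.Str.lower t)
        = pvBFind su su.length (PySem.Str.lower t).toList q (pvCat ((su.drop j).take (q - j))) := by
  intro k
  induction k with
  | zero =>
      intro q hjq hk
      rw [pvBFind, dif_neg (by omega)]
      have : su.length - q = 0 := by omega
      rw [this]
      simp
  | succ k ih =>
      intro q hjq hk
      have hqn : q < su.length := by omega
      have hget : su.getD q "" = su[q] := List.getD_eq_getElem su "" hqn
      have hrange : su.length - q = (su.length - (q + 1)) + 1 := by omega
      have htake : (su.drop j).take (q + 1 - j) = (su.drop j).take (q - j) ++ [su[q]] := by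
        have h1 : q + 1 - j = (q - j) + 1 := by omega
        have h2 : q - j < (su.drop j).length := by simp [List.length_drop]; omega
        rw [h1, List.take_succ]
        congr 1
        rw [List.getElem?_eq_getElem h2]
        simp
        congr 1
        omega
      rw [pvBFind, dif_pos hqn, hget, hrange, List.range'_succ, List.find?_cons]
      by_cases hc : pvJoinRep ((su.drop j).take (q + 1 - j)) = PySem.Str.lower t
      · have hc' : PySem.Chars.replace (pvCat ((su.drop j).take (q - j)) ++ su[q].toList) ['#', '#'] []
            = (PySem.Str.lower t).toList := by
          rw [← cond_bridge, ← htake]; exact hc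
        rw [if_pos hc']
        simp [hc]
      · have hc' : ¬ (PySem.Chars.replace (pvCat ((su.drop j).take (q - j)) ++ su[q].toList) ['#', '#'] []
            = (PySem.Str.lower t).toList) := by
          rw [← cond_bridge, ← htake]; exact hc
        rw [if_neg hc']
        have hpred : (pvJoinRep ((su.drop j).take (q + 1 - j)) == PySem.Str.lower t) = false := by
          simp [hc]
        rw [hpred]
        have hcat : pvCat ((su.drop j).take (q - j)) ++ su[q].toList
            = pvCat ((su.drop j).take (q + 1 - j)) := by
          rw [htake]; simp [pvCat]
        rw [hcat]
        have := ih (q + 1) (by omega) (by omega)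
        simpa using this

theorem pvNext_eq_pvBFind (su : List String) (t : String) (j : Nat) :
    pvNext su j t = pvBFind su su.length (PySem.Str.lower t).toList j [] := by
  have := pvNext_aux su t j (su.length - j) j (le_refl j) rfl
  simpa [pvNext, pvCat] using this

-- ===== mask lemma =====

theorem mask_set_split (P : List Int) (j p n : Nat) (hjp : j < p) (hpn : p < n) (hP : P.length = j) :
    (P ++ (1 : Int) :: List.replicate (n - j - 1) 0).set p 1
      = (P ++ (1 : Int) :: List.replicate (p - j - 1) 0) ++ (1 : Int) :: List.replicate (n - p - 1) 0 := by
  have hrep : List.replicate (n - j - 1) (0 : Int)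
      = List.replicate (p - j - 1) 0 ++ (0 : Int) :: List.replicate (n - p - 1) 0 := by
    rw [show n - j - 1 = (p - j - 1) + (n - p) by omega, List.replicate_add]
    congr 1
    rw [show n - p = (n - p - 1) + 1 by omega, List.replicate_succ]
    simp
  rw [hrep, List.set_append, if_neg (by simp [hP]; omega)]
  have h1 : p - P.length = (p - j - 1) + 1 := by omega
  rw [h1, List.set_cons_succ, List.set_append, if_neg (by simp)]
  have h2 : p - j - 1 - (List.replicate (p - j - 1) (0 : Int)).length = 0 := by simp
  rw [h2]
  simp

-- ===== MAIN: B's mask construction equals A's group emission, under Pre_ =====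

theorem pvMain (su tokens : List String) :
    ∀ k c j (P : List Int), P.length = j → j < su.length → su.length - j = k →
      pvRaisesAux su (tokens.drop c) j = false →
      pvBOuterM su su.length (tokens.drop c) j
          (P ++ (1 : Int) :: List.replicate (su.length - j - 1) 0)
        = P ++ pvTP tokens c (su.drop j) := by
  intro k
  induction k using Nat.strong_induction_on with
  | _ k ih =>
    intro c j P hP hj hk hra
    cases hdc : tokens.drop c with
    | nil =>
        rw [hdc] at hra
        simp [pvRaisesAux] at hra
        omega
    | cons t ts' =>
        rw [hdc] at hra
        have hgc : PySem.List.pyGet? tokens (c : Int) = some t := by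
          rw [PySem.List.pyGet?_natCast]
          have : (tokens.drop c)[0]? = tokens[c]? := by
            simp [List.getElem?_drop]
          rw [← this, hdc]
          rfl
        have hts' : ts' = tokens.drop (c + 1) := by
          have : tokens.drop (c + 1) = (tokens.drop c).drop 1 := by
            rw [← List.drop_drop]
          rw [this, hdc]
          rfl
        have hdropj : su.drop j = su[j] :: su.drop (j + 1) := List.drop_eq_getElem_cons hj
        have hfind := pvBInner_eq_of_pvBFind su (PySem.Str.lower t) (su.length - j) j []
          (le_of_lt hj) rfl
        have htl : PySem.Chars.lower t.toList = (PySem.Str.lower t).toList :=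
          (PySem.Str.toList_lower t).symm
        have hnx := pvNext_eq_pvBFind su t j
        rw [pvBOuterM, htl]
        -- pvTP unfolded on the cons shape of su.drop j
        have hTP : pvTP tokens c (su.drop j)
            = (let r := pvBInner (PySem.Str.lower t) [] (su.drop j)
               ((1 : Int) :: List.replicate (r.1 - 1) 0) ++
                 pvTP tokens (if r.2.2 then c + 1 else c) r.2.1) := by
          rw [hdropj, pvTP, hgc, ← hdropj]
        cases hf : pvBFind su su.length (PySem.Str.lower t).toList j [] with
        | none =>
            simp only [pvCat, List.map_nil, List.flatten_nil] at hfind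
            rw [hf] at hfind
            rw [hfind] at hTP
            simp only [List.length_nil, Nat.zero_add] at hTP
            rw [hTP, pvTP]
            simp
        | some p =>
            have hb := pvBFind_bounds su su.length (PySem.Str.lower t).toList
              (su.length - j) j [] p rfl hf
            simp only [pvCat, List.map_nil, List.flatten_nil] at hfind
            rw [hf] at hfind
            rw [hfind] at hTP
            simp only [List.length_nil, Nat.zero_add] at hTP
            simp only []
            by_cases hpn : p = su.length
            · rw [if_pos hpn]
              subst hpn
              rw [hTP]
              simp [pvTP]
            · rw [if_neg hpn]
              have hplt : p < su.length := by omega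
              -- the new mask after mask[p] = 1
              have hmask : PySem.List.pySetD
                  (P ++ (1 : Int) :: List.replicate (su.length - j - 1) 0) (p : Int) 1
                  = (P ++ (1 : Int) :: List.replicate (p - j - 1) 0)
                      ++ (1 : Int) :: List.replicate (su.length - p - 1) 0 := by
                rw [PySem.List.pySetD_natCast]
                exact mask_set_split P j p su.length (by omega) hplt hP
              rw [hmask]
              -- the Pre_ recursion steps to (ts', p)
              have hra' : pvRaisesAux su (tokens.drop (c + 1)) p = false := by
                rw [← hts']
                rw [pvRaisesAux, hnx, hf] at hra
                exact hra
              have hP' : (P ++ (1 : Int) :: List.replicate (p - j - 1) 0).length = p := by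
                simp [hP]
                omega
              have := ih (su.length - p) (by omega) (c + 1) p
                (P ++ (1 : Int) :: List.replicate (p - j - 1) 0) hP' hplt rfl hra'
              rw [← hts'] at this
              rw [this, hTP]
              simp

theorem ports_agree (subword_units tokens : List String)
    (hpre : Pre_bpes2tokens subword_units tokens) :
    bpes2tokens subword_units tokens = bpes2tokens_alt subword_units tokens := by
  cases hsu : subword_units with
  | nil =>
      cases tokens with
      | nil => rfl
      | cons t ts =>
          show pvALoop _ [] 0 [] 0 [] = bpes2tokens_alt [] (t :: ts)
          rw [pvALoop]
          unfold bpes2tokens_alt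
          simp only [List.length_nil]
          rw [pvBOuterM, pvBFind]
          simp
  | cons s0 rest =>
      rw [← hsu]
      have hne : subword_units ≠ [] := by rw [hsu]; simp
      have hlen : 0 < subword_units.length := List.length_pos_of_ne_nil hne
      rw [pvA_eq_pvTP]
      unfold bpes2tokens_alt
      simp only []
      rw [if_pos (by omega)]
      have hmask : PySem.List.pySetD (List.replicate subword_units.length (0 : Int)) 0 1
          = ([] : List Int) ++ (1 : Int) :: List.replicate (subword_units.length - 0 - 1) 0 := by
        rw [show (0 : Int) = ((0 : Nat) : Int) by simp, PySem.List.pySetD_natCast]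
        rw [show subword_units.length = (subword_units.length - 1) + 1 by omega,
          List.replicate_succ]
        simp
      rw [hmask]
      have := pvMain subword_units tokens subword_units.length 0 0 [] rfl (by omega) (by omega)
        (by simpa [Pre_bpes2tokens] using hpre)
      simp only [List.drop_zero] at this
      rw [this]
      simp

-- ===== VERDICT (by name: the statement is the Claim_ definition above) =====
theorem bpes2tokens_spec : Claim_equal_bpes2tokens := by
  intro subword_units tokens _ hpre
  exact ports_agree subword_units tokens hpre
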